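-- pv_equiv track=rewrite | github.com/Carlanga213/Estrategias_Algoritmicas | Notas_Libreria/codigos_presentaciones/P04_ejercicio_2.py | sums_sum_count
-- ===== SOURCE A (Python) =====
-- def sums_sum_count(array: list[int]) -> int:
--     sum_s = 0
--     count = 0
--     for m in range(len(array)):  # se itera por el arreglo con m
--         sum_m = 0
--         for k in range(m + 1):
--             sum_m += array[k]  # se suman los elementos en el arreglo de k a m + 1
--             count += 1 # se cuenta una suma mas
--         sum_s += sum_m # datos experimental
--         count += 1  # se cuenta una suma mas
--     return sum_s, count # se devuelve la suma de sumas y su contador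
-- ===== SOURCE B (Python) =====
-- def sums_sum_count(array: list[int]) -> int:
--     # single pass: running prefix sum; operation count by closed form n*(n+3)//2
--     running = 0
--     total = 0
--     for x in array:
--         running += x
--         total += running
--     n = len(array)
--     return total, n * (n + 3) // 2
-- ===== Notes on version B (the rewrite author's own statement) =====
-- stated objective: faster
-- what changed: replaced the quadratic nested loop (recomputing each prefix sum from scratch) by a single pass maintaining a running prefix sum, with the operation counter computed by the closed form n*(n+3)//2
import Mathlib
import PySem

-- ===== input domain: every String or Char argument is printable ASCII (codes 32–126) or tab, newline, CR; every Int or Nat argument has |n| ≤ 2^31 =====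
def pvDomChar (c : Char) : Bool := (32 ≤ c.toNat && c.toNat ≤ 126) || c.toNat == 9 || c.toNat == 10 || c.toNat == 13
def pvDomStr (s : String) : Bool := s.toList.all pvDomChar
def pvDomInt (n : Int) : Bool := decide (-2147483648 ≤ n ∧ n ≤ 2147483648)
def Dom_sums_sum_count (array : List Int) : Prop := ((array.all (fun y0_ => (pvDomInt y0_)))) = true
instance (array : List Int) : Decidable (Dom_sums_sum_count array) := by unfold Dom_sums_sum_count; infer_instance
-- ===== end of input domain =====

-- B replaces A's quadratic nested prefix-sum recomputation by a single pass with a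
-- running prefix sum and a closed-form operation count (objective: faster, asymptotic).


-- ===== PORT A =====
-- literal port: outer loop over range(len(array)) carrying (sum_s, count);
-- inner loop over range(m+1) recomputes the prefix sum and counts every addition.
def sums_sum_count (array : List Int) : Int × Int :=
  (PySem.List.pyRange 0 (array.length : Int) 1).foldl
    (fun (st : Int × Int) m =>
      let inner := (PySem.List.pyRange 0 (m + 1) 1).foldl
        (fun (st2 : Int × Int) k => (st2.1 + PySem.List.pyGetD array k 0, st2.2 + 1))
        (0, st.2)
      (st.1 + inner.1, inner.2 + 1))
    (0, 0)

-- ===== PORT B =====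
-- literal port of Source B: one pass with a running prefix sum; count by closed form.
def sums_sum_count_alt (array : List Int) : Int × Int :=
  let st := array.foldl (fun (st : Int × Int) x => (st.1 + x, st.2 + (st.1 + x))) (0, 0)
  (st.2, PySem.Int.floordiv ((array.length : Int) * ((array.length : Int) + 3)) 2)

-- ===== PRECONDITION & SPEC =====
def Spec_sums_sum_count (array : List Int) (out : Int × Int) : Prop := out = sums_sum_count_alt array
instance (array : List Int) (out : Int × Int) : Decidable (Spec_sums_sum_count array out) := by unfold Spec_sums_sum_count; infer_instance

-- ===== CLAIM (what is proved, stated in full; the proofs are below) =====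
def Claim_equal_sums_sum_count : Prop := ∀ (array : List Int), Dom_sums_sum_count array → Spec_sums_sum_count array (sums_sum_count array)

-- ===== LEMMAS AND PROOFS =====

-- sum of the first N prefix sums of xs, each offset by r (proof-only helper)
def pvPS (r : Int) (xs : List Int) : Nat → Int
  | 0 => 0
  | N + 1 => pvPS r xs N + (r + (xs.take (N + 1)).sum)

-- count accumulated by A's first N outer iterations (proof-only helper)
def pvC : Nat → Int
  | 0 => 0
  | N + 1 => pvC N + ((N : Int) + 2)

lemma pvPS_cons (r x : Int) (xs : List Int) :
    ∀ n, pvPS r (x :: xs) (n + 1) = (r + x) + pvPS (r + x) xs n := by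
  intro n
  induction n with
  | zero => simp [pvPS]
  | succ n ih =>
    show pvPS r (x :: xs) (n + 1) + _ = _
    rw [ih]
    simp [pvPS, List.take_succ_cons]
    ring

lemma bfold_eq (xs : List Int) : ∀ r t : Int,
    xs.foldl (fun (st : Int × Int) x => (st.1 + x, st.2 + (st.1 + x))) (r, t)
      = (r + xs.sum, t + pvPS r xs xs.length) := by
  induction xs with
  | nil => intro r t; simp [pvPS]
  | cons x xs ih =>
    intro r t
    simp only [List.foldl_cons, ih (r + x) (t + (r + x)), List.sum_cons, List.length_cons,
      pvPS_cons]
    simp only [Prod.mk.injEq]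
    exact ⟨by ring, by ring⟩

lemma sumcount_fold (ys : List Int) : ∀ s c : Int,
    ys.foldl (fun (st2 : Int × Int) x => (st2.1 + x, st2.2 + 1)) (s, c)
      = (s + ys.sum, c + ys.length) := by
  induction ys with
  | nil => intro s c; simp
  | cons y ys ih =>
    intro s c
    simp only [List.foldl_cons, ih, List.sum_cons, List.length_cons]
    simp only [Prod.mk.injEq]; constructor <;> push_cast <;> ring

-- A's inner loop at outer index N computes the (N+1)-st prefix sum and counts N+1 additions
lemma inner_eq (array : List Int) (N : Nat) (hN : N < array.length) (c : Int) :
    (PySem.List.pyRange 0 ((N : Int) + 1) 1).foldl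
      (fun (st2 : Int × Int) k => (st2.1 + PySem.List.pyGetD array k 0, st2.2 + 1)) (0, c)
      = ((array.take (N + 1)).sum, c + ((N : Int) + 1)) := by
  have hcongr : (PySem.List.pyRange 0 ((N : Int) + 1) 1).foldl
      (fun (st2 : Int × Int) k => (st2.1 + PySem.List.pyGetD array k 0, st2.2 + 1)) (0, c)
      = (PySem.List.pyRange 0 ((N : Int) + 1) 1).foldl
      (fun (st2 : Int × Int) k => (st2.1 + PySem.List.pyGetD (array.take (N + 1)) k 0, st2.2 + 1)) (0, c) := by
    apply PySem.List.foldl_congr_mem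
    intro st2 k hk
    rw [PySem.List.mem_pyRange_one] at hk
    have hk1 : k.toNat < N + 1 := by omega
    have hk2 : k.toNat < array.length := by omega
    rw [PySem.List.pyGetD_eq_getElem array 0 hk.1 (by push_cast; omega),
        PySem.List.pyGetD_eq_getElem (array.take (N + 1)) 0 hk.1
          (by simp [List.length_take]; push_cast; omega)]
    simp [List.getElem_take]
  have hlen : ((N : Int) + 1) = ((array.take (N + 1)).length : Int) := by
    simp [List.length_take]; omega
  rw [hcongr, hlen,
      PySem.List.foldl_pyRange_zero_pyGetD' (array.take (N + 1)) 0
        (fun st2 x => (st2.1 + x, st2.2 + 1)) (0, c), sumcount_fold]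
  simp

lemma afold_eq (array : List Int) : ∀ (N : Nat), N ≤ array.length → ∀ s c : Int,
    (PySem.List.pyRange 0 (N : Int) 1).foldl
      (fun (st : Int × Int) m =>
        let inner := (PySem.List.pyRange 0 (m + 1) 1).foldl
          (fun (st2 : Int × Int) k => (st2.1 + PySem.List.pyGetD array k 0, st2.2 + 1))
          (0, st.2)
        (st.1 + inner.1, inner.2 + 1)) (s, c)
      = (s + pvPS 0 array N, c + pvC N) := by
  intro N
  induction N with
  | zero => intro _ s c; simp [pvPS, pvC]
  | succ N ih =>
    intro hN s c
    have h1 : ((N : Int) + 1) = ((N + 1 : Nat) : Int) := by push_cast; ring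
    rw [show ((N + 1 : Nat) : Int) = (N : Int) + 1 by push_cast; ring,
        PySem.List.pyRange_one_succ_right (by positivity), List.foldl_append,
        ih (by omega) s c]
    simp only [List.foldl_cons, List.foldl_nil]
    rw [inner_eq array N (by omega)]
    simp only [pvPS, pvC, Prod.mk.injEq]
    exact ⟨by ring, by ring⟩

lemma pvC_closed : ∀ N : Nat, PySem.Int.floordiv ((N : Int) * ((N : Int) + 3)) 2 = pvC N := by
  intro N
  have h : (N : Int) * ((N : Int) + 3) = pvC N * 2 := by
    induction N with
    | zero => simp [pvC]
    | succ n ih => simp only [pvC]; push_cast; push_cast at ih; ring_nf; ring_nf at ih; omega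
  rw [h, PySem.Int.floordiv_eq_ediv_of_pos (by norm_num), Int.mul_ediv_cancel _ (by norm_num)]

-- ===== VERDICT (by name: the statement is the Claim_ definition above) =====
theorem sums_sum_count_spec : Claim_equal_sums_sum_count := by
  intro array _
  unfold Spec_sums_sum_count sums_sum_count sums_sum_count_alt
  rw [afold_eq array array.length le_rfl 0 0, bfold_eq array 0 0, pvC_closed]
  simp
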